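-- pv_equiv track=rewrite | github.com/liskos/zadanie25osipov | variant_03/23.py | algor
-- ===== SOURCE A (Python) =====
-- def algor(a, b):
--     if a == b:
--         return 1
--     if b < a:
--         return 0
--     if b % 2 == 0:
--         return algor(a, b-2) + algor(a, b // 2) + algor(a, b - 3)
--     return algor(a, b-2) + algor(a, b - 3)
-- ===== SOURCE B (Python) =====
-- def algor(a, b):
--     # Same recursion, but memoized with a dictionary so every value of b is
--     # computed at most once (top-down dynamic programming).
--     cache = {}
--     def go(b):
--         if b == a:
--             return 1
--         if b < a:
--             return 0
--         if b in cache: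
--             return cache[b]
--         if b % 2 == 0:
--             r = go(b - 2) + go(b // 2) + go(b - 3)
--         else:
--             r = go(b - 2) + go(b - 3)
--         cache[b] = r
--         return r
--     return go(b)
-- ===== Notes on version B (the rewrite author's own statement) =====
-- stated objective: alternative
-- what changed: B replaces the naive re-expanding recursion by a memoized (dictionary-cached, top-down dynamic programming) recursion that computes each reachable value of b at most once.
import Mathlib
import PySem

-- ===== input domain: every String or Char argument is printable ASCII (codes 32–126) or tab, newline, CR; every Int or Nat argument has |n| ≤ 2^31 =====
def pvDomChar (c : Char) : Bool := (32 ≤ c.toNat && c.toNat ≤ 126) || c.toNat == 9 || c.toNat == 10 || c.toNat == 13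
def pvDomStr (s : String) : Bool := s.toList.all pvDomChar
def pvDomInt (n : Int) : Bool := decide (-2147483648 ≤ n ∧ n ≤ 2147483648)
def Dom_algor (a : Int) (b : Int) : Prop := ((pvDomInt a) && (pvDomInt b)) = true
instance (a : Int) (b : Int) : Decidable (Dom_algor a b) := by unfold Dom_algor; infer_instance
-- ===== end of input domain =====

-- B memoizes A's recursion with a dictionary (top-down dynamic programming); equivalence proved on Pre_ (exactly the inputs where A's recursion terminates).

-- ===== PORT A =====
-- A is general recursion (it does not terminate for every input), so the port
-- carries a fuel argument; on Pre_algor the fuel algorFuel a b exceeds the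
-- recursion depth, so the port computes exactly what the Python computes.
def algorF : Nat → Int → Int → Option Int
  | 0, _, _ => none
  | Nat.succ n, a, b =>
    if a = b then some 1
    else if b < a then some 0
    else if PySem.Int.mod b 2 = 0 then
      match algorF n a (b - 2), algorF n a (PySem.Int.floordiv b 2), algorF n a (b - 3) with
      | some x, some y, some z => some (x + y + z)
      | _, _, _ => none
    else
      match algorF n a (b - 2), algorF n a (b - 3) with
      | some x, some z => some (x + z)
      | _, _ => none

def algorFuel (a : Int) (b : Int) : Nat := (b - a).toNat + 8

def algor (a : Int) (b : Int) : Int := (algorF (algorFuel a b) a b).getD 0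

-- ===== PORT B =====
-- B's inner `go` with its cache dictionary threaded through; same fuel device.
def goMemo (a : Int) : Nat → Int → PySem.Dict Int Int → Option (Int × PySem.Dict Int Int)
  | 0, _, _ => none
  | Nat.succ n, b, c =>
    if b = a then some (1, c)
    else if b < a then some (0, c)
    else match PySem.Dict.get? c b with
      | some v => some (v, c)
      | none =>
        if PySem.Int.mod b 2 = 0 then
          match goMemo a n (b - 2) c with
          | none => none
          | some (x, c1) =>
            match goMemo a n (PySem.Int.floordiv b 2) c1 with
            | none => none
            | some (y, c2) =>
              match goMemo a n (b - 3) c2 with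
              | none => none
              | some (z, c3) => some (x + y + z, c3.insert b (x + y + z))
        else
          match goMemo a n (b - 2) c with
          | none => none
          | some (x, c1) =>
            match goMemo a n (b - 3) c1 with
            | none => none
            | some (z, c2) => some (x + z, c2.insert b (x + z))

def algor_alt (a : Int) (b : Int) : Int :=
  match goMemo a (algorFuel a b) b PySem.Dict.empty with
  | some (v, _) => v
  | none => 0

-- ===== PRECONDITION & SPEC =====
-- Pre_algor is exactly the set of inputs on which the Python A terminates
-- (elsewhere A recurses forever through b//2 and b-2 — e.g. the cycle
-- -2 → -4 → -2 — and dies with RecursionError); it excludes no input on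
-- which A returns.
def Pre_algor (a : Int) (b : Int) : Prop :=
  0 ≤ a ∨ b ≤ a ∨ (a ≤ -5 ∧ PySem.Int.mod b 2 ≠ 0 ∧ b ≤ a + 3) ∨
    (-4 ≤ a ∧ (b ≤ -1 ∨ b = 1))
instance (a : Int) (b : Int) : Decidable (Pre_algor a b) := by unfold Pre_algor; infer_instance
def pvWitness_algor : Int × Int := (0, 12)

def Spec_algor (a : Int) (b : Int) (out : Int) : Prop := out = algor_alt a b
instance (a : Int) (b : Int) (out : Int) : Decidable (Spec_algor a b out) := by unfold Spec_algor; infer_instance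

-- ===== CLAIM (what is proved, stated in full; the proofs are below) =====
def Claim_equal_algor : Prop := ∀ (a : Int) (b : Int), Dom_algor a b → Pre_algor a b → Spec_algor a b (algor a b)

-- ===== LEMMAS AND PROOFS =====

-- fuel monotonicity of A's port
theorem algorF_mono : ∀ (n m : Nat) (a b : Int) (v : Int), n ≤ m →
    algorF n a b = some v → algorF m a b = some v := by
  intro n
  induction n with
  | zero => intro m a b v _ h; simp [algorF] at h
  | succ k ih =>
    intro m a b v hle h
    obtain ⟨m', rfl⟩ : ∃ m', m = m' + 1 := ⟨m - 1, by omega⟩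
    have hk : k ≤ m' := by omega
    simp only [algorF] at h ⊢
    split_ifs at h ⊢ with h1 h2 h3
    · exact h
    · exact h
    · rcases hx : algorF k a (b - 2) with _ | x <;> rw [hx] at h
      · simp at h
      rcases hy : algorF k a (PySem.Int.floordiv b 2) with _ | y <;> rw [hy] at h
      · simp at h
      rcases hz : algorF k a (b - 3) with _ | z <;> rw [hz] at h
      · simp at h
      rw [ih m' a (b - 2) x hk hx, ih m' a (PySem.Int.floordiv b 2) y hk hy,
        ih m' a (b - 3) z hk hz]
      exact h
    · rcases hx : algorF k a (b - 2) with _ | x <;> rw [hx] at h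
      · simp at h
      rcases hz : algorF k a (b - 3) with _ | z <;> rw [hz] at h
      · simp at h
      rw [ih m' a (b - 2) x hk hx, ih m' a (b - 3) z hk hz]
      exact h

theorem algorF_det {n m : Nat} {a b v w : Int}
    (hv : algorF n a b = some v) (hw : algorF m a b = some w) : v = w := by
  rcases le_total n m with h | h
  · have := algorF_mono n m a b v h hv; rw [this] at hw; exact (Option.some.inj hw)
  · have := algorF_mono m n a b w h hw; rw [this] at hv; exact (Option.some.inj hv).symm

-- the finite corner region -4 ≤ a ≤ -1, a < b ≤ 1 admitted by Pre_ terminates in depth ≤ 8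
set_option maxHeartbeats 2000000 in
theorem algorF_fin (a b : Int) (ha : -4 ≤ a) (ha' : a ≤ -1) (hb : a < b) (hb' : b ≤ 1)
    (hpre : b ≤ -1 ∨ b = 1) : (algorF 8 a b).isSome := by
  interval_cases a <;> interval_cases b <;> first | decide | omega

-- one unfolding step of A's port at successor fuel
theorem algorF_succ (n : Nat) (a b : Int) :
    algorF (n + 1) a b =
      (if a = b then some 1
      else if b < a then some 0
      else if PySem.Int.mod b 2 = 0 then
        match algorF n a (b - 2), algorF n a (PySem.Int.floordiv b 2), algorF n a (b - 3) with
        | some x, some y, some z => some (x + y + z)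
        | _, _, _ => none
      else
        match algorF n a (b - 2), algorF n a (b - 3) with
        | some x, some z => some (x + z)
        | _, _ => none) := rfl

-- on Pre_, fuel algorFuel a b suffices
theorem algorF_suff : ∀ (k : Nat) (a b : Int), (b - a).toNat = k → Pre_algor a b →
    (algorF ((b - a).toNat + 8) a b).isSome := by
  intro k
  induction k using Nat.strong_induction_on with
  | _ k ih =>
    intro a b hk hpre
    have hm2 : PySem.Int.mod b 2 = b % 2 := PySem.Int.mod_eq_emod_of_pos (by norm_num)
    have hd2 : PySem.Int.floordiv b 2 = b / 2 := PySem.Int.floordiv_eq_ediv_of_pos (by norm_num)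
    rw [show (b - a).toNat + 8 = ((b - a).toNat + 7) + 1 from rfl, algorF_succ]
    by_cases hab : a = b
    · rw [if_pos hab]; simp
    rw [if_neg hab]
    by_cases hba : b < a
    · rw [if_pos hba]; simp
    rw [if_neg hba]
    -- live case : a < b
    have hlt : a < b := by omega
    -- helper to use the IH for a subcall
    have sub : ∀ b' : Int, Pre_algor a b' → (b' - a).toNat < (b - a).toNat →
        ∃ v, algorF ((b - a).toNat + 7) a b' = some v := by
      intro b' hp hlt'
      have h := ih (b' - a).toNat (by omega) a b' rfl hp
      rcases Option.isSome_iff_exists.mp h with ⟨v, hv⟩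
      exact ⟨v, algorF_mono _ _ _ _ _ (by omega) hv⟩
    rcases hpre with ha0 | hba' | ⟨ha5, hodd, hb3⟩ | ⟨ha4, hb1⟩
    · -- 0 ≤ a < b
      obtain ⟨x, hx⟩ := sub (b - 2) (Or.inl ha0) (by omega)
      obtain ⟨z, hz⟩ := sub (b - 3) (Or.inl ha0) (by omega)
      by_cases hev : PySem.Int.mod b 2 = 0
      · obtain ⟨y, hy⟩ := sub (PySem.Int.floordiv b 2) (Or.inl ha0) (by rw [hd2]; omega)
        rw [if_pos hev, hx, hy, hz]; simp
      · rw [if_neg hev, hx, hz]; simp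
    · omega
    · -- a ≤ -5, b odd, a < b ≤ a + 3
      have hodd2 : b % 2 = 1 := by rw [hm2] at hodd; omega
      have hp2 : Pre_algor a (b - 2) := by
        by_cases h : b - 2 ≤ a
        · exact Or.inr (Or.inl h)
        · refine Or.inr (Or.inr (Or.inl ⟨ha5, ?_, by omega⟩))
          rw [show PySem.Int.mod (b - 2) 2 = (b - 2) % 2 from
            PySem.Int.mod_eq_emod_of_pos (by norm_num)]
          omega
      obtain ⟨x, hx⟩ := sub (b - 2) hp2 (by omega)
      obtain ⟨z, hz⟩ := sub (b - 3) (Or.inr (Or.inl (by omega))) (by omega)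
      have hev : ¬ PySem.Int.mod b 2 = 0 := by rw [hm2]; omega
      rw [if_neg hev, hx, hz]; simp
    · -- -4 ≤ a, a < 0 here (0 ≤ a is the first disjunct), a < b, b ≤ -1 ∨ b = 1
      by_cases ha0 : 0 ≤ a
      · obtain ⟨x, hx⟩ := sub (b - 2) (Or.inl ha0) (by omega)
        obtain ⟨z, hz⟩ := sub (b - 3) (Or.inl ha0) (by omega)
        by_cases hev : PySem.Int.mod b 2 = 0
        · obtain ⟨y, hy⟩ := sub (PySem.Int.floordiv b 2) (Or.inl ha0) (by rw [hd2]; omega)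
          rw [if_pos hev, hx, hy, hz]; simp
        · rw [if_neg hev, hx, hz]; simp
      · have hfin := algorF_fin a b (by omega) (by omega) hlt (by omega) hb1
        rcases Option.isSome_iff_exists.mp hfin with ⟨v, hv⟩
        have := algorF_mono 8 (((b - a).toNat + 7) + 1) a b v (by omega) hv
        rw [algorF_succ] at this
        rw [if_neg hab, if_neg hba] at this
        rw [this]
        simp

-- cache invariant: every cached value is a value of A's recursion
def GoodCache (a : Int) (c : PySem.Dict Int Int) : Prop :=
  ∀ k v, PySem.Dict.get? c k = some v → ∃ n, algorF n a k = some v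

-- simulation: whenever A's port succeeds at fuel n from a good cache,
-- B's memoized port succeeds at the same fuel with the same value
theorem goMemo_sim : ∀ (n : Nat) (a b : Int) (c : PySem.Dict Int Int) (v : Int),
    algorF n a b = some v → GoodCache a c →
    ∃ c', goMemo a n b c = some (v, c') ∧ GoodCache a c' := by
  intro n
  induction n with
  | zero => intro a b c v h _; simp [algorF] at h
  | succ k ih =>
    intro a b c v h hgood
    rw [algorF_succ] at h
    show ∃ c', (if b = a then some (1, c)
      else if b < a then some (0, c)
      else match PySem.Dict.get? c b with
        | some v => some (v, c)
        | none =>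
          if PySem.Int.mod b 2 = 0 then
            match goMemo a k (b - 2) c with
            | none => none
            | some (x, c1) =>
              match goMemo a k (PySem.Int.floordiv b 2) c1 with
              | none => none
              | some (y, c2) =>
                match goMemo a k (b - 3) c2 with
                | none => none
                | some (z, c3) => some (x + y + z, c3.insert b (x + y + z))
          else
            match goMemo a k (b - 2) c with
            | none => none
            | some (x, c1) =>
              match goMemo a k (b - 3) c1 with
              | none => none
              | some (z, c2) => some (x + z, c2.insert b (x + z))) = some (v, c')
        ∧ GoodCache a c'
    by_cases hab : a = b
    · rw [if_pos hab] at h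
      obtain rfl : (1 : Int) = v := Option.some.inj h
      rw [if_pos hab.symm]
      exact ⟨c, rfl, hgood⟩
    have hba' : ¬ b = a := fun h' => hab h'.symm
    rw [if_neg hab] at h
    rw [if_neg hba']
    by_cases hba : b < a
    · rw [if_pos hba] at h
      obtain rfl : (0 : Int) = v := Option.some.inj h
      rw [if_pos hba]
      exact ⟨c, rfl, hgood⟩
    rw [if_neg hba] at h
    rw [if_neg hba]
    rcases hc : PySem.Dict.get? c b with _ | w
    · -- cache miss: recurse
      by_cases hev : PySem.Int.mod b 2 = 0
      · rw [if_pos hev] at h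
        simp only [if_pos hev]
        rcases hx : algorF k a (b - 2) with _ | x <;> rw [hx] at h
        · simp at h
        rcases hy : algorF k a (PySem.Int.floordiv b 2) with _ | y <;> rw [hy] at h
        · simp at h
        rcases hz : algorF k a (b - 3) with _ | z <;> rw [hz] at h
        · simp at h
        obtain rfl : x + y + z = v := Option.some.inj h
        obtain ⟨c1, hm1, hg1⟩ := ih a (b - 2) c x hx hgood
        obtain ⟨c2, hm2, hg2⟩ := ih a (PySem.Int.floordiv b 2) c1 y hy hg1
        obtain ⟨c3, hm3, hg3⟩ := ih a (b - 3) c2 z hz hg2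
        refine ⟨c3.insert b (x + y + z), ?_, ?_⟩
        · simp only [hm1, hm2, hm3]
        · intro k' v' hk'
          rw [PySem.Dict.get?_insert] at hk'
          split_ifs at hk' with hkb
          · subst hkb
            obtain rfl : x + y + z = v' := Option.some.inj hk'
            exact ⟨k + 1, by rw [algorF_succ, if_neg hab, if_neg hba, if_pos hev, hx, hy, hz]⟩
          · exact hg3 k' v' hk'
      · rw [if_neg hev] at h
        simp only [if_neg hev]
        rcases hx : algorF k a (b - 2) with _ | x <;> rw [hx] at h
        · simp at h
        rcases hz : algorF k a (b - 3) with _ | z <;> rw [hz] at h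
        · simp at h
        obtain rfl : x + z = v := Option.some.inj h
        obtain ⟨c1, hm1, hg1⟩ := ih a (b - 2) c x hx hgood
        obtain ⟨c2, hm2, hg2⟩ := ih a (b - 3) c1 z hz hg1
        refine ⟨c2.insert b (x + z), ?_, ?_⟩
        · simp only [hm1, hm2]
        · intro k' v' hk'
          rw [PySem.Dict.get?_insert] at hk'
          split_ifs at hk' with hkb
          · subst hkb
            obtain rfl : x + z = v' := Option.some.inj hk'
            exact ⟨k + 1, by rw [algorF_succ, if_neg hab, if_neg hba, if_neg hev, hx, hz]⟩
          · exact hg2 k' v' hk'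
    · -- cache hit
      obtain ⟨m, hmv⟩ := hgood b w hc
      have hv : v = w := algorF_det
        (show algorF (k + 1) a b = some v by rw [algorF_succ, if_neg hab, if_neg hba]; exact h)
        hmv
      rw [hv]
      exact ⟨c, rfl, hgood⟩

-- ===== VERDICT (by name: the statement is the Claim_ definition above) =====
theorem algor_spec : Claim_equal_algor := by
  intro a b _ hpre
  unfold Spec_algor
  have hs := algorF_suff (b - a).toNat a b rfl hpre
  rcases Option.isSome_iff_exists.mp hs with ⟨v, hv⟩
  have hgood : GoodCache a PySem.Dict.empty := by
    intro k v hk; rw [PySem.Dict.get?_empty] at hk; exact absurd hk (by simp)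
  obtain ⟨c', hm, _⟩ := goMemo_sim ((b - a).toNat + 8) a b PySem.Dict.empty v hv hgood
  unfold algor algor_alt algorFuel
  rw [hv, hm]
  rfl
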